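-- pv_equiv track=rewrite | github.com/wellcometrust/reach | separate.py | split_reference
-- ===== SOURCE A (Python) =====
-- def split_reference(reference):
--     """Split up one individual reference into reference components.
--     Each component is numbered by the reference it came from.
--     """
--     components = []
--
--     # I need to divide each reference by the full stops
--     # AND commas and categorise
--     reference_sentences_mid = [
--         elem.strip()
--         for elem in reference.replace(
--             ',', '.'
--         ).replace(
--             '?', '?.'
--         ).replace(
--             '!', '!.'
--         ).split(".")
--     ]
--
--     for ref in reference_sentences_mid:
--         if ref:
--             components.append(ref)
--
--     return components
-- ===== SOURCE B (Python) =====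
-- def split_reference(reference):
--     """Split up one individual reference into reference components."""
--     components = []
--     buf = ""
--     for ch in reference:
--         if ch in ',.':
--             s = buf.strip()
--             if s:
--                 components.append(s)
--             buf = ""
--         elif ch in '?!':
--             s = (buf + ch).strip()
--             if s:
--                 components.append(s)
--             buf = ""
--         else:
--             buf += ch
--     s = buf.strip()
--     if s:
--         components.append(s)
--     return components
-- ===== Notes on version B (the rewrite author's own statement) =====
-- stated objective: alternative
-- what changed: Replaces A's build-three-intermediate-strings-then-split-then-strip-then-filter pipeline by a single character-by-character scan with a segment buffer that flushes on ',' '.' and after '?' '!'.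
import Mathlib
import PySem

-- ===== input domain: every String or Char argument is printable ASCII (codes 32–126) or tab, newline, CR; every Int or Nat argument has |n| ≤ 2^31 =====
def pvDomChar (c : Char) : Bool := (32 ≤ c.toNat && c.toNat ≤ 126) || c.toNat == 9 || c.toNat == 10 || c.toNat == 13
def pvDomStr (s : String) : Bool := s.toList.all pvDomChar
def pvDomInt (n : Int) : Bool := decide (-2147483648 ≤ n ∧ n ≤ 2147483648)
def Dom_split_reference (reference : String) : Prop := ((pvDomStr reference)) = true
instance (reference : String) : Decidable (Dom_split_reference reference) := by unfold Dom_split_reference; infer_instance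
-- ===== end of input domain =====

-- B replaces A's replace/replace/replace/split/strip/filter string pipeline by a single
-- character scan with a segment buffer (same cost class; objective: alternative).

-- ===== PORT A =====
def split_reference (reference : String) : List String :=
  let reference_sentences_mid : List String :=
    ((PySem.Str.split?
        (PySem.Str.replace
          (PySem.Str.replace
            (PySem.Str.replace reference "," ".")
            "?" "?.")
          "!" "!.")
        ".").getD []).map PySem.Str.strip
  reference_sentences_mid.foldl
    (fun components ref => if ref ≠ "" then components ++ [ref] else components) []

-- ===== PORT B =====
-- flush: append the stripped buffer to the components if non-empty
def pvFlush (components : List String) (buf : List Char) : List String :=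
  let s := PySem.Chars.strip buf
  if s = [] then components else components ++ [String.ofList s]

def pvScan : List Char → List Char → List String → List String
  | [], buf, components => pvFlush components buf
  | c :: cs, buf, components =>
    if c = ',' ∨ c = '.' then pvScan cs [] (pvFlush components buf)
    else if c = '?' ∨ c = '!' then pvScan cs [] (pvFlush components (buf ++ [c]))
    else pvScan cs (buf ++ [c]) components

def split_reference_alt (reference : String) : List String :=
  pvScan reference.toList [] []

-- ===== PRECONDITION & SPEC =====
def Spec_split_reference (reference : String) (out : List String) : Prop := out = split_reference_alt reference
instance (reference : String) (out : List String) : Decidable (Spec_split_reference reference out) := by unfold Spec_split_reference; infer_instance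

-- ===== CLAIM (what is proved, stated in full; the proofs are below) =====
def Claim_equal_split_reference : Prop := ∀ (reference : String), Dom_split_reference reference → Spec_split_reference reference (split_reference reference)

-- ===== LEMMAS AND PROOFS =====

-- structural model of Python str.replace with a single-character pattern
def pvRepl1 (o : Char) (new : List Char) : List Char → List Char
  | [] => []
  | c :: cs => if c = o then new ++ pvRepl1 o new cs else c :: pvRepl1 o new cs

-- structural model of split('.')
def pvSplitDot : List Char → List (List Char)
  | [] => [[]]
  | c :: cs => if c = '.' then [] :: pvSplitDot cs else (pvSplitDot cs).modifyHead (c :: ·)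

-- the segments A's replace-chain-then-split produces, computed structurally
def pvSeg : List Char → List (List Char)
  | [] => [[]]
  | c :: cs =>
    if c = ',' ∨ c = '.' then [] :: pvSeg cs
    else if c = '?' ∨ c = '!' then [c] :: pvSeg cs
    else (pvSeg cs).modifyHead (c :: ·)

-- strip each segment, drop the empty ones, back to strings
def pvFin (l : List (List Char)) : List String :=
  ((l.map PySem.Chars.strip).filter (· ≠ [])).map String.ofList

theorem pvModifyHead_id {α : Type} (l : List α) : l.modifyHead (fun x => x) = l := by
  cases l <;> simp [List.modifyHead]

theorem pvReplace_go_spec (o : Char) (new : List Char) :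
    ∀ (fuel : Nat) (l acc : List Char), l.length ≤ fuel →
      PySem.Chars.replace.go [o] new fuel l acc = acc.reverse ++ pvRepl1 o new l := by
  intro fuel
  induction fuel with
  | zero =>
    intro l acc h
    have : l = [] := by cases l <;> simp_all
    subst this; simp [PySem.Chars.replace.go, pvRepl1]
  | succ n ih =>
    intro l acc h
    cases l with
    | nil => simp [PySem.Chars.replace.go, pvRepl1]
    | cons c t =>
      by_cases hc : c = o
      · subst hc
        rw [PySem.Chars.replace.go]
        rw [if_pos (by simp [List.isPrefixOf])]
        simp only [List.length_cons, List.length_nil, List.drop_succ_cons, List.drop_zero]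
        rw [ih t (new.reverse ++ acc) (by simpa using h)]
        simp [pvRepl1]
      · rw [PySem.Chars.replace.go]
        have hpre : [o].isPrefixOf (c :: t) = false := by
          simp [List.isPrefixOf]
          exact fun hco => absurd hco.symm hc
        simp only [hpre, Bool.false_eq_true, if_false]
        rw [ih t (c :: acc) (by simpa using Nat.le_of_succ_le_succ h)]
        simp [pvRepl1, hc]

theorem pvReplace_single (s : List Char) (o : Char) (new : List Char) :
    PySem.Chars.replace s [o] new = pvRepl1 o new s := by
  rw [PySem.Chars.replace]
  simp only [List.isEmpty_cons, Bool.false_eq_true, if_false]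
  simpa using pvReplace_go_spec o new s.length s [] (le_refl _)

theorem pvSplit_go_spec :
    ∀ (fuel : Nat) (l cur : List Char) (acc : List (List Char)), l.length < fuel →
      PySem.Chars.splitOn.go ['.'] fuel l cur acc
        = acc.reverse ++ (pvSplitDot l).modifyHead (cur.reverse ++ ·) := by
  intro fuel
  induction fuel with
  | zero => intro l cur acc h; omega
  | succ n ih =>
    intro l cur acc h
    cases l with
    | nil => simp [PySem.Chars.splitOn.go, pvSplitDot]
    | cons c t =>
      by_cases hc : c = '.'
      · subst hc
        rw [PySem.Chars.splitOn.go]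
        rw [if_pos (by simp [List.isPrefixOf])]
        simp only [List.length_cons, List.length_nil, List.drop_succ_cons, List.drop_zero]
        rw [ih t [] (cur.reverse :: acc) (by simpa using h)]
        simp [pvSplitDot, pvModifyHead_id]
      · rw [PySem.Chars.splitOn.go]
        have hpre : ['.'].isPrefixOf (c :: t) = false := by
          simp [List.isPrefixOf]
          exact fun hco => absurd hco.symm hc
        simp only [hpre, Bool.false_eq_true, if_false]
        rw [ih t (c :: cur) acc (by simpa using Nat.lt_of_succ_lt_succ h)]
        simp only [pvSplitDot, if_neg hc, List.modifyHead_modifyHead]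
        have hf : (fun x : List Char => (c :: cur).reverse ++ x)
            = ((fun x : List Char => cur.reverse ++ x) ∘ fun x => c :: x) := by
          funext x; simp
        rw [hf]

theorem pvSplitOn_dot (s : List Char) :
    PySem.Chars.splitOn s ['.'] = pvSplitDot s := by
  rw [PySem.Chars.splitOn]
  rw [pvSplit_go_spec (s.length + 1) s [] [] (Nat.lt_succ_self _)]
  simp [pvModifyHead_id]

-- the replace chain followed by split('.') is exactly pvSeg
theorem pvSeg_spec (cs : List Char) :
    pvSplitDot (pvRepl1 '!' ['!', '.'] (pvRepl1 '?' ['?', '.'] (pvRepl1 ',' ['.'] cs))) = pvSeg cs := by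
  induction cs with
  | nil => simp [pvRepl1, pvSplitDot, pvSeg]
  | cons c cs ih =>
    by_cases h1 : c = ','
    · subst h1; simp [pvRepl1, pvSplitDot, pvSeg, ih]
    · by_cases h2 : c = '?'
      · subst h2; simp [pvRepl1, pvSplitDot, pvSeg, ih]
      · by_cases h3 : c = '!'
        · subst h3; simp [pvRepl1, pvSplitDot, pvSeg, ih]
        · by_cases h4 : c = '.'
          · subst h4; simp [pvRepl1, pvSplitDot, pvSeg, ih]
          · simp [pvRepl1, pvSplitDot, pvSeg, ih, h1, h2, h3, h4]

theorem pvFin_cons (x : List Char) (l : List (List Char)) :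
    pvFin (x :: l) = pvFin [x] ++ pvFin l := by
  by_cases h : PySem.Chars.strip x = [] <;> simp [pvFin, h]

theorem pvFlush_eq (components : List String) (buf : List Char) :
    pvFlush components buf = components ++ pvFin [buf] := by
  by_cases h : PySem.Chars.strip buf = [] <;> simp [pvFlush, pvFin, h]

theorem pvScan_spec :
    ∀ (cs buf : List Char) (components : List String),
      pvScan cs buf components = components ++ pvFin ((pvSeg cs).modifyHead (buf ++ ·)) := by
  intro cs
  induction cs with
  | nil =>
    intro buf components
    simp [pvScan, pvFlush_eq, pvSeg]
  | cons c cs ih =>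
    intro buf components
    have hid : (pvSeg cs).modifyHead (fun x => ([] : List Char) ++ x) = pvSeg cs := by
      simp [pvModifyHead_id]
    by_cases h1 : c = ',' ∨ c = '.'
    · have hseg : (pvSeg (c :: cs)).modifyHead (buf ++ ·) = buf :: pvSeg cs := by
        simp [pvSeg, h1]
      rw [pvScan, if_pos h1, ih [] (pvFlush components buf), pvFlush_eq, hid, hseg,
        pvFin_cons buf (pvSeg cs), List.append_assoc]
    · by_cases h2 : c = '?' ∨ c = '!'
      · have hseg : (pvSeg (c :: cs)).modifyHead (buf ++ ·) = (buf ++ [c]) :: pvSeg cs := by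
          simp [pvSeg, h1, h2]
        rw [pvScan, if_neg h1, if_pos h2, ih [] (pvFlush components (buf ++ [c])), pvFlush_eq,
          hid, hseg, pvFin_cons (buf ++ [c]) (pvSeg cs), List.append_assoc]
      · have hseg : (pvSeg (c :: cs)).modifyHead (buf ++ ·)
            = (pvSeg cs).modifyHead ((buf ++ [c]) ++ ·) := by
          simp only [pvSeg, if_neg h1, if_neg h2, List.modifyHead_modifyHead]
          congr 1
          funext x
          simp
        rw [pvScan, if_neg h1, if_neg h2, ih (buf ++ [c]) components, hseg]

theorem pvAlt_eq (reference : String) :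
    split_reference_alt reference = pvFin (pvSeg reference.toList) := by
  rw [split_reference_alt, pvScan_spec]
  simp [pvModifyHead_id]

theorem pvStr_strip_eq (s : String) :
    PySem.Str.strip s = String.ofList (PySem.Chars.strip s.toList) := by
  rw [← PySem.Str.toList_strip, String.ofList_toList]

theorem pvA_eq (reference : String) :
    split_reference reference = pvFin (pvSeg reference.toList) := by
  rw [split_reference]
  -- identify the split result through the Chars bridge
  have hb := PySem.Str.split?_map
    (PySem.Str.replace (PySem.Str.replace (PySem.Str.replace reference "," ".") "?" "?.") "!" "!.") "."
  rw [show (("." : String)).toList = ['.'] from rfl] at hb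
  rw [PySem.Chars.split?] at hb
  simp only [List.isEmpty_cons, Bool.false_eq_true, if_false] at hb
  cases hq : PySem.Str.split?
      (PySem.Str.replace (PySem.Str.replace (PySem.Str.replace reference "," ".") "?" "?.") "!" "!.") "." with
  | none => rw [hq] at hb; simp at hb
  | some q =>
    rw [hq] at hb
    simp only [Option.map_some, Option.some.injEq] at hb
    have htl : q.map String.toList = pvSeg reference.toList := by
      rw [hb]
      simp only [PySem.Str.toList_replace]
      rw [show (("," : String)).toList = [','] from rfl,
          show (("." : String)).toList = ['.'] from rfl,
          show (("?" : String)).toList = ['?'] from rfl,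
          show (("?." : String)).toList = ['?', '.'] from rfl,
          show (("!" : String)).toList = ['!'] from rfl,
          show (("!." : String)).toList = ['!', '.'] from rfl]
      rw [pvReplace_single, pvReplace_single, pvReplace_single, pvSplitOn_dot, pvSeg_spec]
    simp only [Option.getD_some]
    -- rewrite the foldl filter loop
    have hfold : ∀ (l : List String),
        l.foldl (fun components ref => if ref ≠ "" then components ++ [ref] else components) []
          = l.filter (· ≠ "") := by
      intro l
      have := PySem.List.foldl_append_if (fun r : String => !(r == "")) id l []
      simpa [ne_eq] using this
    rw [hfold]
    -- push everything to character lists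
    have hmap : q.map PySem.Str.strip
        = (pvSeg reference.toList).map (fun x => String.ofList (PySem.Chars.strip x)) := by
      rw [← htl]
      simp [List.map_map, Function.comp_def, pvStr_strip_eq]
    rw [hmap]
    rw [show (pvSeg reference.toList).map (fun x => String.ofList (PySem.Chars.strip x))
        = ((pvSeg reference.toList).map PySem.Chars.strip).map String.ofList by
      simp [List.map_map, Function.comp_def]]
    rw [pvFin]
    rw [List.filter_map]
    congr 1
    apply List.filter_congr
    intro x _
    simp only [Function.comp, ne_eq, decide_not]
    have hof : (String.ofList x = "") ↔ (x = []) := by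
      constructor
      · intro h
        have := congrArg String.toList h
        simpa using this
      · intro h; subst h; rfl
    simp [hof]

-- ===== VERDICT (by name: the statement is the Claim_ definition above) =====
theorem split_reference_spec : Claim_equal_split_reference := by
  intro reference _
  unfold Spec_split_reference
  rw [pvA_eq, pvAlt_eq]
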